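-- pv_equiv track=rewrite | github.com/MaitriTrivedi/RL_AI_InterviewPracticePlateform | RLAgent/environment.py | _extract_job_roles
-- ===== SOURCE A (Python) =====
-- from typing import Dict, List, Tuple, Any, Optional
--
-- def _extract_job_roles(work_experience: List[Dict[str, str]]) -> List[str]:
--     """Extract job roles from work experience"""
--     roles = []
--     # This is a simplified approach - could be enhanced with NLP
--     common_roles = [
--         'software engineer', 'developer', 'manager', 'analyst',
--         'data scientist', 'designer', 'architect', 'administrator'
--     ]
--
--     for exp in work_experience:
--         description = exp.get('description', '').lower()
--         for role in common_roles:
--             if role in description and role not in roles: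
--                 roles.append(role)
--
--     return roles
-- ===== SOURCE B (Python) =====
-- def _extract_job_roles(work_experience):
--     """Extract job roles from work experience (built back-to-front, no seen-set)."""
--     common_roles = [
--         'software engineer', 'developer', 'manager', 'analyst',
--         'data scientist', 'designer', 'architect', 'administrator'
--     ]
--
--     result = []
--     for exp in reversed(work_experience):
--         description = exp.get('description', '').lower()
--         result = [role for role in common_roles if role in description] \
--             + [role for role in result if role not in description]
--     return result
-- ===== Notes on version B (the rewrite author's own statement) =====
-- stated objective: alternative
-- what changed: Replaces A's forward loop with a seen-roles accumulator and membership dedup by a back-to-front pass over reversed(work_experience) that prepends the roles matched by each description and filters the partial result to roles not contained in that description, so no accumulator or membership-in-output test is needed.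
import Mathlib
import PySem

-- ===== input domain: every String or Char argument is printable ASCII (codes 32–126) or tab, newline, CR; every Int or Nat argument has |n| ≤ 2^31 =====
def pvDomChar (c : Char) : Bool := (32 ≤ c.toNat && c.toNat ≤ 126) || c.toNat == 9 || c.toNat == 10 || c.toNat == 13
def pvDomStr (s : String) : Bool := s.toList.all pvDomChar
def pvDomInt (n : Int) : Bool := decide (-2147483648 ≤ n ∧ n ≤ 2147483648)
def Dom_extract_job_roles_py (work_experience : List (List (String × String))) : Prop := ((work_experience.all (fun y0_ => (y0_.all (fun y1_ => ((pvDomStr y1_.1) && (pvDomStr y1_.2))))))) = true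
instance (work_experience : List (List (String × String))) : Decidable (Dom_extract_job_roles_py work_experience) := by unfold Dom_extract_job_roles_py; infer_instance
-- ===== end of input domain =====

-- B differs from A only in structure (a reversed-loop back-to-front build instead of an accumulator loop with membership dedup); same return value.

-- ===== PORT A =====
-- the literal common_roles list, shared verbatim by both Pythons
def pvCommonRoles : List String :=
  ["software engineer", "developer", "manager", "analyst",
   "data scientist", "designer", "architect", "administrator"]

-- body of A's inner 'for role in common_roles' loop
def pvAInner (description : String) (roles : List String) (role : String) : List String :=
  if PySem.Str.isIn role description && !(roles.contains role) then roles ++ [role] else roles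

-- body of A's outer 'for exp in work_experience' loop
def pvAStep (roles : List String) (exp : List (String × String)) : List String :=
  let description := PySem.Str.lower (PySem.Dict.getD ⟨exp⟩ "description" "")
  pvCommonRoles.foldl (pvAInner description) roles

def extract_job_roles_py (work_experience : List (List (String × String))) : List String :=
  work_experience.foldl pvAStep []

-- ===== PORT B =====
-- body of B's 'for exp in reversed(work_experience)' loop
def pvBStep (result : List String) (exp : List (String × String)) : List String :=
  let description := PySem.Str.lower (PySem.Dict.getD ⟨exp⟩ "description" "")
  pvCommonRoles.filter (fun role => PySem.Str.isIn role description)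
    ++ result.filter (fun role => !(PySem.Str.isIn role description))

def extract_job_roles_py_alt (work_experience : List (List (String × String))) : List String :=
  work_experience.reverse.foldl pvBStep []

-- ===== PRECONDITION & SPEC =====
def Spec_extract_job_roles_py (work_experience : List (List (String × String))) (out : List String) : Prop := out = extract_job_roles_py_alt work_experience
instance (work_experience : List (List (String × String))) (out : List String) : Decidable (Spec_extract_job_roles_py work_experience out) := by unfold Spec_extract_job_roles_py; infer_instance

-- ===== CLAIM (what is proved, stated in full; the proofs are below) =====
def Claim_equal_extract_job_roles_py : Prop := ∀ (work_experience : List (List (String × String))), Dom_extract_job_roles_py work_experience → Spec_extract_job_roles_py work_experience (extract_job_roles_py work_experience)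

-- ===== LEMMAS AND PROOFS =====

-- structural (head-first) form of B's reversed loop
def pvGo (exps : List (List (String × String))) : List String :=
  match exps with
  | [] => []
  | e :: rest => pvBStep (pvGo rest) e

lemma pvAlt_eq_pvGo : ∀ (ws : List (List (String × String))),
    extract_job_roles_py_alt ws = pvGo ws := by
  intro ws
  induction ws with
  | nil => rfl
  | cons e rest ih =>
    show (e :: rest).reverse.foldl pvBStep [] = pvGo (e :: rest)
    rw [List.reverse_cons, List.foldl_append]
    show pvBStep (extract_job_roles_py_alt rest) e = pvBStep (pvGo rest) e
    rw [ih]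

lemma pvCommonRoles_nodup : pvCommonRoles.Nodup := by decide

-- A's inner loop over a duplicate-free role list appends exactly the new matching roles, in list order
lemma pvAInner_foldl (description : String) :
    ∀ (l acc : List String), l.Nodup →
      l.foldl (pvAInner description) acc
        = acc ++ l.filter (fun r => PySem.Str.isIn r description && !(acc.contains r)) := by
  intro l
  induction l with
  | nil => intro acc _; simp
  | cons r l ih =>
    intro acc hnd
    rcases List.nodup_cons.mp hnd with ⟨hr, hl⟩
    by_cases h : (PySem.Str.isIn r description && !(acc.contains r)) = true
    · have hstep : pvAInner description acc r = acc ++ [r] := by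
        simp only [pvAInner]
        rw [if_pos h]
      rw [List.foldl_cons, hstep, ih _ hl]
      have hfc : l.filter (fun x => PySem.Str.isIn x description && !((acc ++ [r]).contains x))
          = l.filter (fun x => PySem.Str.isIn x description && !(acc.contains x)) := by
        apply List.filter_congr
        intro x hx
        have hxr : x ≠ r := fun hxe => hr (hxe ▸ hx)
        simp [hxr]
      rw [hfc]
      simp only [List.filter_cons]
      rw [if_pos h]
      simp
    · have hstep : pvAInner description acc r = acc := by
        simp only [pvAInner]
        rw [if_neg h]
      rw [List.foldl_cons, hstep, ih _ hl]
      simp only [List.filter_cons]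
      rw [if_neg h]

-- every role B produces comes from the fixed role list
lemma mem_pvGo {r : String} : ∀ {ws : List (List (String × String))}, r ∈ pvGo ws → r ∈ pvCommonRoles := by
  intro ws
  induction ws with
  | nil => simp [pvGo]
  | cons e rest ih =>
    intro h
    simp only [pvGo, pvBStep, List.mem_append, List.mem_filter] at h
    rcases h with h | ⟨h, _⟩
    · exact h.1
    · exact ih h

-- main invariant: A's loop from any accumulator equals the accumulator followed by B's result minus the roles already seen
lemma pvLoop_eq : ∀ (ws : List (List (String × String))) (acc : List String),
    ws.foldl pvAStep acc = acc ++ (pvGo ws).filter (fun r => !(acc.contains r)) := by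
  intro ws
  induction ws with
  | nil => intro acc; simp [pvGo]
  | cons e rest ih =>
    intro acc
    rw [List.foldl_cons]
    show rest.foldl pvAStep (pvAStep acc e) = _
    set d := PySem.Str.lower (PySem.Dict.getD ⟨e⟩ "description" "") with hd
    have hstep : pvAStep acc e
        = acc ++ pvCommonRoles.filter (fun r => PySem.Str.isIn r d && !(acc.contains r)) := by
      simpa [pvAStep] using pvAInner_foldl d pvCommonRoles acc pvCommonRoles_nodup
    set new := pvCommonRoles.filter (fun r => PySem.Str.isIn r d && !(acc.contains r)) with hnew
    rw [hstep, ih (acc ++ new)]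
    have hrest : (pvGo rest).filter (fun r => !((acc ++ new).contains r))
        = (pvGo rest).filter (fun r => !(PySem.Str.isIn r d) && !(acc.contains r)) := by
      apply List.filter_congr
      intro x hx
      have hxC : x ∈ pvCommonRoles := mem_pvGo hx
      have hmem : new.contains x = (PySem.Str.isIn x d && !(acc.contains x)) := by
        by_cases hxm : x ∈ new
        · have h1 : new.contains x = true := List.contains_iff_mem.mpr hxm
          have h2 := (List.mem_filter.mp (hnew ▸ hxm)).2
          rw [h1, h2]
        · have h1 : new.contains x = false :=
            Bool.eq_false_iff.mpr (fun hcc => hxm (List.contains_iff_mem.mp hcc))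
          have h2 : (PySem.Str.isIn x d && !(acc.contains x)) = false := by
            cases hb : (PySem.Str.isIn x d && !(acc.contains x))
            · rfl
            · exact absurd (hnew ▸ List.mem_filter.mpr ⟨hxC, hb⟩) hxm
          rw [h1, h2]
      show (!((acc ++ new).contains x)) = (!(PySem.Str.isIn x d) && !(acc.contains x))
      rw [List.contains_append, hmem]
      cases hb1 : acc.contains x <;> cases hb2 : PySem.Str.isIn x d <;> simp
    rw [hrest]
    have hhere : (pvCommonRoles.filter (fun r => PySem.Str.isIn r d)).filter (fun r => !(acc.contains r)) = new := by
      rw [List.filter_filter, hnew]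
      apply List.filter_congr
      intro x _
      cases hb1 : acc.contains x <;> cases hb2 : PySem.Str.isIn x d <;> simp
    simp only [pvGo, pvBStep, ← hd]
    rw [List.filter_append, hhere, List.filter_filter]
    have : (pvGo rest).filter (fun r => !(acc.contains r) && !(PySem.Str.isIn r d))
        = (pvGo rest).filter (fun r => !(PySem.Str.isIn r d) && !(acc.contains r)) := by
      apply List.filter_congr
      intro x _
      cases hb1 : acc.contains x <;> cases hb2 : PySem.Str.isIn x d <;> simp
    rw [this, List.append_assoc]

-- ===== VERDICT (by name: the statement is the Claim_ definition above) =====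
theorem extract_job_roles_py_spec : Claim_equal_extract_job_roles_py := by
  intro we _
  show extract_job_roles_py we = extract_job_roles_py_alt we
  rw [extract_job_roles_py, pvLoop_eq we [], pvAlt_eq_pvGo we]
  simp
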